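-- pv_equiv track=rewrite | github.com/ozlerhakan/markov-chain | markov.py | get_table_with_range
-- ===== SOURCE A (Python) =====
-- def get_table_with_range(line):
--     '''This is a method using range()
--     '''
--     results = {}
--     for i in range(len(line)):
--         c = line[i]
--         try:
--            out = line[i + 1]
--         except IndexError:
--            break
--         char_dict = results.get(c, {})
--         char_dict.setdefault(out, 0)
--         char_dict[out] += 1
--         results[c] = char_dict
--     return results
-- ===== SOURCE B (Python) =====
-- def get_table_with_range(line):
--     '''Flat pair-count first, then regroup into the nested dict.'''
--     # phase 1: flat frequency table of adjacent pairs
--     cnt = {}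
--     for pair in zip(line, line[1:]):
--         cnt[pair] = cnt.get(pair, 0) + 1
--     # phase 2: reshape the flat counts into the nested dict
--     results = {}
--     for (c, out), n in cnt.items():
--         results.setdefault(c, {})[out] = n
--     return results
-- ===== Notes on version B (the rewrite author's own statement) =====
-- stated objective: idiomatic
-- what changed: Replaces A's index walk with try/except-IndexError and per-step nested-dict mutation by two separate phases: a flat frequency table of adjacent pairs built from zip(line, line[1:]), then a regroup pass reshaping the flat counts into the nested dict.
import Mathlib
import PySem

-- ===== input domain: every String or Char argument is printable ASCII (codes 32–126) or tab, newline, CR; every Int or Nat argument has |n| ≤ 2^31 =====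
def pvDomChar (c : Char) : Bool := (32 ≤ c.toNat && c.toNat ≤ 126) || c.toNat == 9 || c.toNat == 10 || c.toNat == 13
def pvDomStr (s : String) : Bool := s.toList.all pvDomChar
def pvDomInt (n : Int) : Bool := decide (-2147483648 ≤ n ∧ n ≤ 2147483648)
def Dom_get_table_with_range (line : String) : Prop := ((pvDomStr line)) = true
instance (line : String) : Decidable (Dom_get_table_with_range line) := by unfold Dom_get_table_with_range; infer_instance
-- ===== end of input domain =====

-- B replaces A's index walk with try/except by two phases — a flat adjacent-pair count, then a
-- regroup of the flat counts into the nested dict (objective: idiomatic decomposition, same cost).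

-- ===== PORT A =====
-- body of A's loop for one pair (c, out): get/setdefault/increment/reassign, step for step
def pvPairStep (results : PySem.Dict String (PySem.Dict String Int)) (c out : String) :
    PySem.Dict String (PySem.Dict String Int) :=
  let char_dict := results.getD c PySem.Dict.empty
  let char_dict2 := char_dict.setdefault out 0
  let char_dict3 := char_dict2.insert out (char_dict2.getD out 0 + 1)
  results.insert c char_dict3

-- 'for i in range(len(line)) … try line[i+1] except IndexError: break' as index recursion
def pvLoopA (l : List Char) (i : Nat)
    (results : PySem.Dict String (PySem.Dict String Int)) :
    PySem.Dict String (PySem.Dict String Int) :=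
  if h : i < l.length then
    match l[i+1]? with
    | none => results
    | some out => pvLoopA l (i+1) (pvPairStep results (String.singleton l[i]) (String.singleton out))
  else results
termination_by l.length - i

def get_table_with_range (line : String) : List (String × List (String × Int)) :=
  (pvLoopA line.toList 0 PySem.Dict.empty).items.map (fun e => (e.1, e.2.items))

-- ===== PORT B =====
-- 'results.setdefault(c, {})[out] = n' for one flat-count entry e = ((c, out), n)
def pvRegroupStep (r : PySem.Dict String (PySem.Dict String Int))
    (e : (String × String) × Int) : PySem.Dict String (PySem.Dict String Int) :=
  let r1 := r.setdefault e.1.1 PySem.Dict.empty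
  r1.insert e.1.1 ((r1.getD e.1.1 PySem.Dict.empty).insert e.1.2 e.2)

def get_table_with_range_alt (line : String) : List (String × List (String × Int)) :=
  let chars := line.toList
  -- phase 1: flat frequency table of adjacent pairs (zip(line, line[1:]))
  let cnt := ((chars.zip chars.tail).map
      (fun q => (String.singleton q.1, String.singleton q.2))).foldl
      (fun d p => d.insert p (d.getD p 0 + 1)) PySem.Dict.empty
  -- phase 2: reshape the flat counts into the nested dict
  let results := cnt.items.foldl pvRegroupStep PySem.Dict.empty
  results.items.map (fun e => (e.1, e.2.items))

-- ===== PRECONDITION & SPEC =====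
def Spec_get_table_with_range (line : String) (out : List (String × List (String × Int))) : Prop := out = get_table_with_range_alt line
instance (line : String) (out : List (String × List (String × Int))) : Decidable (Spec_get_table_with_range line out) := by unfold Spec_get_table_with_range; infer_instance

-- ===== CLAIM (what is proved, stated in full; the proofs are below) =====
def Claim_equal_get_table_with_range : Prop := ∀ (line : String), Dom_get_table_with_range line → Spec_get_table_with_range line (get_table_with_range line)

-- ===== LEMMAS AND PROOFS =====

-- canonical step both loop bodies reduce to: r[c] = r.get(c, {}) with out ↦ v written in
def pvStep (r : PySem.Dict String (PySem.Dict String Int))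
    (e : (String × String) × Int) : PySem.Dict String (PySem.Dict String Int) :=
  r.insert e.1.1 ((r.getD e.1.1 PySem.Dict.empty).insert e.1.2 e.2)

-- overwrite r with value v at the nested slot (c, o)
def pvPhi (c o : String) (v : Int) (r : PySem.Dict String (PySem.Dict String Int)) :
    PySem.Dict String (PySem.Dict String Int) :=
  r.insert c ((r.getD c PySem.Dict.empty).insert o v)

lemma pvModify_eq_insert {κ ν : Type} [BEq κ] [LawfulBEq κ] (d : PySem.Dict κ ν) (k : κ)
    (d0 : ν) (f : ν → ν) : d.modify k d0 f = d.insert k (f (d.getD k d0)) :=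
  PySem.Dict.ext_iff.mpr rfl

lemma pvRegroupStep_eq (r : PySem.Dict String (PySem.Dict String Int))
    (e : (String × String) × Int) : pvRegroupStep r e = pvStep r e := by
  unfold pvRegroupStep pvStep
  dsimp only
  by_cases h : r.contains e.1.1 = true
  · rw [PySem.Dict.setdefault_of_contains r _ h]
  · have h' : r.contains e.1.1 = false := by simpa using h
    rw [PySem.Dict.setdefault_of_not_contains r _ h', PySem.Dict.getD_insert_self,
      PySem.Dict.insert_insert_self, PySem.Dict.getD_of_not_contains r _ h']

lemma pvPairStep_eq (r : PySem.Dict String (PySem.Dict String Int)) (c o : String) :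
    pvPairStep r c o = pvStep r ((c, o), (r.getD c PySem.Dict.empty).getD o 0 + 1) := by
  unfold pvPairStep pvStep
  dsimp only
  by_cases h : (r.getD c PySem.Dict.empty).contains o = true
  · rw [PySem.Dict.setdefault_of_contains _ _ h]
  · have h' : (r.getD c PySem.Dict.empty).contains o = false := by simpa using h
    rw [PySem.Dict.setdefault_of_not_contains _ _ h', PySem.Dict.getD_insert_self,
      PySem.Dict.insert_insert_self, PySem.Dict.getD_of_not_contains _ _ h']

-- A's index loop is the fold of pvPairStep over the adjacent pairs of the suffix
lemma pvLoopA_eq (n : Nat) (l : List Char) (i : Nat) (hn : l.length - i ≤ n)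
    (r : PySem.Dict String (PySem.Dict String Int)) :
    pvLoopA l i r = ((l.drop i).zip (l.drop i).tail).foldl
      (fun r q => pvPairStep r (String.singleton q.1) (String.singleton q.2)) r := by
  induction n generalizing i r with
  | zero =>
    have hle : l.length ≤ i := by omega
    rw [pvLoopA, dif_neg (by omega), List.drop_eq_nil_of_le hle]
    rfl
  | succ n ih =>
    rw [pvLoopA]
    by_cases h : i < l.length
    · rw [dif_pos h]
      rcases Nat.lt_or_ge (i+1) l.length with h2 | h2
      · have hget : l[i+1]? = some l[i+1] := List.getElem?_eq_getElem h2
        rw [hget]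
        have hd1 : l.drop i = l[i] :: l.drop (i+1) := List.drop_eq_getElem_cons h
        have hd2 : l.drop (i+1) = l[i+1] :: l.drop (i+2) := List.drop_eq_getElem_cons h2
        dsimp only
        rw [ih (i+1) (by omega), hd1, hd2]
        rfl
      · have hget : l[i+1]? = none := List.getElem?_eq_none h2
        rw [hget]
        have hd1 : l.drop i = l[i] :: l.drop (i+1) := List.drop_eq_getElem_cons h
        rw [hd1, List.drop_eq_nil_of_le h2]
        rfl
    · rw [dif_neg h, List.drop_eq_nil_of_le (by omega)]
      rfl

-- nested lookup after the fold, key never written by L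
lemma pvF_getD_not_mem (L : List ((String × String) × Int)) (p : String × String)
    (hp : p ∉ L.map (·.1)) (r : PySem.Dict String (PySem.Dict String Int)) :
    (((L.foldl pvStep r).getD p.1 PySem.Dict.empty).getD p.2 0) =
      ((r.getD p.1 PySem.Dict.empty).getD p.2 0) := by
  induction L generalizing r with
  | nil => rfl
  | cons e L ih =>
    have hne : e.1 ≠ p := fun h => hp (by simp [← h])
    have hp' : p ∉ L.map (·.1) := fun h => hp (by simp [h])
    rw [List.foldl_cons, ih hp']
    unfold pvStep
    by_cases hc : p.1 = e.1.1
    · have ho : p.2 ≠ e.1.2 := fun h2 => hne (Prod.ext (hc.symm) (h2.symm))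
      rw [hc, PySem.Dict.getD_insert_self, PySem.Dict.getD_insert_of_ne _ _ _ ho]
    · rw [PySem.Dict.getD_insert_of_ne _ _ _ hc]

-- nested lookup after the fold, key written exactly once by L with value w
lemma pvF_getD_mem (L : List ((String × String) × Int)) (p : String × String) (w : Int)
    (hmem : (p, w) ∈ L) (hnd : (L.map (·.1)).Nodup)
    (r : PySem.Dict String (PySem.Dict String Int)) :
    (((L.foldl pvStep r).getD p.1 PySem.Dict.empty).getD p.2 0) = w := by
  induction L generalizing r with
  | nil => cases hmem
  | cons e L ih =>
    rw [List.map_cons, List.nodup_cons] at hnd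
    rcases List.mem_cons.mp hmem with he | htail
    · have hp : p ∉ L.map (·.1) := by
        have : e.1 = p := by rw [← he]
        rw [← this]; exact hnd.1
      rw [List.foldl_cons, pvF_getD_not_mem L p hp, ← he]
      unfold pvStep
      rw [PySem.Dict.getD_insert_self, PySem.Dict.getD_insert_self]
    · rw [List.foldl_cons]; exact ih htail hnd.2 _

-- two inserts at distinct keys commute when the first key is already present
lemma pvInsert_insert_comm {κ ν : Type} [BEq κ] [LawfulBEq κ] (d : PySem.Dict κ ν)
    (k k' : κ) (v w : ν) (hc : d.contains k = true) (hne : k' ≠ k) :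
    (d.insert k v).insert k' w = (d.insert k' w).insert k v := by
  apply PySem.Dict.ext
  by_cases h' : d.contains k' = true
  · rw [PySem.Dict.items_insert_of_contains _ _ (by rw [PySem.Dict.contains_insert]; simp [h']),
      PySem.Dict.items_insert_of_contains _ _ hc,
      PySem.Dict.items_insert_of_contains _ _ (by rw [PySem.Dict.contains_insert]; simp [hc]),
      PySem.Dict.items_insert_of_contains _ _ h', List.map_map, List.map_map]
    apply List.map_congr_left
    intro q _
    simp only [Function.comp_apply]
    by_cases h1 : q.1 = k
    · simp [h1, Ne.symm hne]
    · by_cases h2 : q.1 = k'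
      · simp [h2, hne]
      · simp [h1, h2]
  · have h'' : (d.insert k v).contains k' = false := by
      rw [PySem.Dict.contains_insert]; simp [hne, h']
    rw [PySem.Dict.items_insert_of_not_contains _ _ h'',
      PySem.Dict.items_insert_of_contains _ _ hc,
      PySem.Dict.items_insert_of_contains _ _ (by rw [PySem.Dict.contains_insert]; simp [hc]),
      PySem.Dict.items_insert_of_not_contains _ _ (by simpa using h'), List.map_append]
    simp only [List.map_cons, List.map_nil, List.append_cancel_left_eq, List.cons.injEq, and_true]
    simp [hne]

lemma pvStep_phi_comm (c o : String) (v : Int) (r : PySem.Dict String (PySem.Dict String Int))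
    (e : (String × String) × Int) (hc : r.contains c = true)
    (ho : (r.getD c PySem.Dict.empty).contains o = true) (hne : e.1 ≠ (c, o)) :
    pvStep (pvPhi c o v r) e = pvPhi c o v (pvStep r e) := by
  unfold pvStep pvPhi
  by_cases hcc : e.1.1 = c
  · have hoo : e.1.2 ≠ o := fun h => hne (Prod.ext hcc h)
    rw [hcc, PySem.Dict.getD_insert_self, PySem.Dict.getD_insert_self,
      PySem.Dict.insert_insert_self, PySem.Dict.insert_insert_self,
      pvInsert_insert_comm _ o e.1.2 _ _ ho hoo]
  · rw [PySem.Dict.getD_insert_of_ne _ _ _ hcc,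
      PySem.Dict.getD_insert_of_ne _ _ _ (fun h => hcc h.symm)]
    exact pvInsert_insert_comm _ c e.1.1 _ _ hc hcc

lemma pvPhi_comm_fold (L : List ((String × String) × Int)) (c o : String) (v : Int)
    (r : PySem.Dict String (PySem.Dict String Int)) (hc : r.contains c = true)
    (ho : (r.getD c PySem.Dict.empty).contains o = true)
    (hL : ∀ e ∈ L, e.1 ≠ (c, o)) :
    L.foldl pvStep (pvPhi c o v r) = pvPhi c o v (L.foldl pvStep r) := by
  induction L generalizing r with
  | nil => rfl
  | cons e L ih =>
    rw [List.foldl_cons, List.foldl_cons,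
      pvStep_phi_comm c o v r e hc ho (hL e (List.mem_cons_self ..))]
    apply ih
    · unfold pvStep
      rw [PySem.Dict.contains_insert]
      simp [hc]
    · unfold pvStep
      by_cases hcc : c = e.1.1
      · rw [← hcc, PySem.Dict.getD_insert_self, PySem.Dict.contains_insert]
        simp [ho]
      · rw [PySem.Dict.getD_insert_of_ne _ _ _ hcc]; exact ho
    · exact fun e' h => hL e' (List.mem_cons_of_mem _ h)

-- replacing the (unique) entry at key (c, o) by v, then folding, is folding then overwriting
lemma pvF_replace (L : List ((String × String) × Int)) (c o : String) (v : Int)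
    (hnd : (L.map (·.1)).Nodup) (w : Int) (hmem : ((c, o), w) ∈ L)
    (r : PySem.Dict String (PySem.Dict String Int)) :
    (L.map (fun q => if q.1 == (c, o) then ((c, o), v) else q)).foldl pvStep r =
      pvPhi c o v (L.foldl pvStep r) := by
  induction L generalizing r with
  | nil => cases hmem
  | cons e L ih =>
    rw [List.map_cons, List.nodup_cons] at hnd
    by_cases he : e.1 = (c, o)
    · have hid : L.map (fun q => if q.1 == (c, o) then ((c, o), v) else q) = L := by
        have hq : ∀ q ∈ L, (if q.1 == (c, o) then ((c, o), v) else q) = id q := by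
          intro q hq
          have hq1 : q.1 ≠ (c, o) := fun h => hnd.1 (by
            rw [he]; exact h ▸ List.mem_map_of_mem hq)
          simp [hq1]
        rw [List.map_congr_left hq, List.map_id]
      have hhd : (if e.1 == (c, o) then ((c, o), v) else e) = ((c, o), v) := by simp [he]
      rw [List.map_cons, hhd, hid, List.foldl_cons, List.foldl_cons]
      have hstep : pvStep r ((c, o), v) = pvPhi c o v (pvStep r e) := by
        unfold pvStep pvPhi
        rw [he, PySem.Dict.getD_insert_self, PySem.Dict.insert_insert_self,
          PySem.Dict.insert_insert_self]
      rw [hstep]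
      apply pvPhi_comm_fold
      · unfold pvStep; rw [he, PySem.Dict.contains_insert]; simp
      · unfold pvStep; rw [he, PySem.Dict.getD_insert_self, PySem.Dict.contains_insert]; simp
      · intro e' h h'
        exact hnd.1 (by rw [← he] at h'; exact h' ▸ List.mem_map_of_mem h)
    · have hmem' : ((c, o), w) ∈ L := by
        rcases List.mem_cons.mp hmem with h | h
        · exact absurd (by rw [← h]) he
        · exact h
      have hhd : (if e.1 == (c, o) then ((c, o), v) else e) = e := by simp [he]
      rw [List.map_cons, hhd, List.foldl_cons, List.foldl_cons]
      exact ih hnd.2 hmem' _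

-- central lemma: A's fold over the pair stream = B's fold over the flat counter's items
lemma pvMain (ps : List (String × String)) :
    ps.foldl (fun r p => pvPairStep r p.1 p.2) PySem.Dict.empty =
      ((PySem.Dict.counter ps).items).foldl pvStep PySem.Dict.empty := by
  induction ps using List.reverseRecOn with
  | nil => rfl
  | append_singleton ps p ih =>
    rw [List.foldl_append, List.foldl_cons, List.foldl_nil, ih, pvPairStep_eq,
      PySem.Dict.counter_append_singleton, pvModify_eq_insert]
    by_cases hc : (PySem.Dict.counter ps).contains p = true
    · have hsome : (PySem.Dict.counter ps).get? p =
          some ((PySem.Dict.counter ps).getD p 0) := by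
        rw [PySem.Dict.getD_eq_get?_getD]
        have hiss : ((PySem.Dict.counter ps).get? p).isSome := by
          rw [← PySem.Dict.contains_eq_isSome_get?]; exact hc
        rcases Option.isSome_iff_exists.mp hiss with ⟨w, hw⟩
        rw [hw]; rfl
      have hmem := PySem.Dict.mem_items_of_get?_eq_some _ hsome
      rw [PySem.Dict.items_insert_of_contains _ _ hc]
      rw [pvF_replace _ p.1 p.2 _ (PySem.Dict.nodup_keys_counter ps)
        ((PySem.Dict.counter ps).getD p 0) hmem]
      rw [pvF_getD_mem _ p ((PySem.Dict.counter ps).getD p 0) hmem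
        (PySem.Dict.nodup_keys_counter ps)]
      rfl
    · have hc' : (PySem.Dict.counter ps).contains p = false := by simpa using hc
      have hp : p ∉ ((PySem.Dict.counter ps).items).map (·.1) := by
        intro h
        exact hc (PySem.Dict.contains_iff_mem_keys .. |>.mpr h)
      rw [PySem.Dict.items_insert_of_not_contains _ _ hc', List.foldl_append,
        List.foldl_cons, List.foldl_nil, pvF_getD_not_mem _ p hp,
        PySem.Dict.getD_of_not_contains _ _ hc']
      rfl

-- ===== VERDICT (by name: the statement is the Claim_ definition above) =====
theorem get_table_with_range_spec : Claim_equal_get_table_with_range := by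
  intro line _
  unfold Spec_get_table_with_range get_table_with_range get_table_with_range_alt
  dsimp only
  have hregroup : pvRegroupStep = pvStep :=
    funext fun r => funext fun e => pvRegroupStep_eq r e
  rw [PySem.Dict.foldl_insert_getD_add_one_eq_counter, hregroup]
  congr 1
  rw [pvLoopA_eq line.toList.length line.toList 0 (by omega), List.drop_zero]
  have h := pvMain ((line.toList.zip line.toList.tail).map
    (fun q => (String.singleton q.1, String.singleton q.2)))
  simp only [List.foldl_map] at h
  exact congrArg PySem.Dict.items h
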